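-- pv_equiv track=rewrite | github.com/kadirnar/Tsukasa-Speech-English | importable.py | merge_short_elements
-- ===== SOURCE A (Python) =====
-- def merge_short_elements(lst):
--     i = 0
--     while i < len(lst):
--         if i > 0 and len(lst[i]) < 10:
--             lst[i-1] += ' ' + lst[i]
--             lst.pop(i)
--         else:
--             i += 1
--     return lst
-- ===== SOURCE B (Python) =====
-- def merge_short_elements(lst):
--     groups = []
--     for x in lst:
--         if groups and len(x) < 10:
--             groups[-1].append(x)
--         else:
--             groups.append([x])
--     return [' '.join(g) for g in groups]
-- ===== Notes on version B (the rewrite author's own statement) =====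
-- stated objective: faster
-- what changed: Replaces A's in-place while-loop with repeated list.pop (each pop shifts the tail) by a single forward pass that builds a fresh result list, appending each short element onto the last entry of the result.
import Mathlib
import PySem

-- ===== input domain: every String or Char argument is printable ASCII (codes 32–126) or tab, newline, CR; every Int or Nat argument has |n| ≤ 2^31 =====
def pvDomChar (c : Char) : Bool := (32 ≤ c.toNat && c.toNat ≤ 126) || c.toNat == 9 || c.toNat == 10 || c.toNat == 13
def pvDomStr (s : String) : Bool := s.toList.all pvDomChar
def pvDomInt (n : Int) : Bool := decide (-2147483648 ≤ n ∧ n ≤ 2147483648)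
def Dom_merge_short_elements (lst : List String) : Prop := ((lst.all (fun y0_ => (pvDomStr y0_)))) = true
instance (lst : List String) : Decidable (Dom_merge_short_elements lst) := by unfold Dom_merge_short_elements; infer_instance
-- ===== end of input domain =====

-- B replaces A's quadratic in-place while-loop (repeated list.pop and string +=) by one linear
-- pass that groups the pieces and joins each group once (measured asymptotically faster).
-- A mutates and returns its argument; B returns a new list — the equivalence proved here is
-- about the RETURN value only.


-- ===== PORT A =====
-- Python str concatenation a + b, kernel-transparent (exact: by character lists)
def pvCat (a b : String) : String := String.ofList (a.toList ++ b.toList)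

-- the while-loop of A: index i over the (mutated) list; lst[i] with i known in range is List.getD
def mergeLoopA (lst : List String) (i : Nat) : List String :=
  if _h : i < lst.length then
    if 0 < i ∧ PySem.Str.len (lst.getD i "") < 10 then
      -- lst[i-1] += ' ' + lst[i]; lst.pop(i)
      mergeLoopA (((lst.set (i - 1) (pvCat (pvCat (lst.getD (i - 1) "") " ") (lst.getD i "")))).eraseIdx i) i
    else
      mergeLoopA lst (i + 1)
  else lst
termination_by lst.length - i
decreasing_by
  · simp only [List.length_eraseIdx, List.length_set]
    split <;> omega
  · omega

def merge_short_elements (lst : List String) : List String := mergeLoopA lst 0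

-- ===== PORT B =====
-- one step of B's pass: add x to the last group, or start a new group
def stepB (groups : List (List String)) (x : String) : List (List String) :=
  if groups ≠ [] ∧ PySem.Str.len x < 10 then
    PySem.List.pySetD groups (-1) (PySem.List.pyGetD groups (-1) [] ++ [x])
  else
    groups ++ [[x]]

def merge_short_elements_alt (lst : List String) : List String :=
  (lst.foldl stepB []).map (PySem.Str.join " ")

-- ===== PRECONDITION & SPEC =====
def Spec_merge_short_elements (lst : List String) (out : List String) : Prop := out = merge_short_elements_alt lst
instance (lst : List String) (out : List String) : Decidable (Spec_merge_short_elements lst out) := by unfold Spec_merge_short_elements; infer_instance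

-- ===== CLAIM (what is proved, stated in full; the proofs are below) =====
def Claim_equal_merge_short_elements : Prop := ∀ (lst : List String), Dom_merge_short_elements lst → Spec_merge_short_elements lst (merge_short_elements lst)

-- ===== LEMMAS AND PROOFS =====
lemma eraseIdx_append_cons_length {α : Type} (p s : List α) (x : α) :
    (p ++ x :: s).eraseIdx p.length = p ++ s := by
  induction p with
  | nil => simp
  | cons a p ih => simp [ih]

lemma getD_append_cons_length {α : Type} [Inhabited α] (p s : List α) (x d : α) :
    (p ++ x :: s).getD p.length d = x := by
  simp [List.getD]

lemma pyGetD_append_singleton_neg_one {α : Type} (q : List α) (y d : α) :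
    PySem.List.pyGetD (q ++ [y]) (-1) d = y :=
  PySem.List.pyGetD_neg_one_append_singleton q y d

lemma pySetD_append_singleton_neg_one {α : Type} (q : List α) (y v : α) :
    PySem.List.pySetD (q ++ [y]) (-1) v = q ++ [v] := by
  simp [PySem.List.pySetD, PySem.List.pySet?, PySem.List.pyIdx?]

-- ' '.join over a group extended by one piece = Python's  prev + ' ' + x
lemma join_concat (g : List String) (hg : g ≠ []) (x : String) :
    PySem.Str.join " " (g ++ [x]) = pvCat (pvCat (PySem.Str.join " " g) " ") x := by
  apply String.toList_inj.mp
  simp only [pvCat, String.toList_ofList, PySem.Str.toList_join, List.map_append, List.map_cons,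
    List.map_nil]
  induction g with
  | nil => exact absurd rfl hg
  | cons a g ih =>
      cases g with
      | nil =>
          simp [PySem.Chars.join_cons_cons, PySem.Chars.join_singleton]
      | cons b g =>
          have ih' := ih (by simp)
          simp only [List.map_cons, List.cons_append] at ih' ⊢
          rw [PySem.Chars.join_cons_cons, PySem.Chars.join_cons_cons, ih']
          simp

lemma join_singleton_str (x : String) : PySem.Str.join " " [x] = x := by
  apply String.toList_inj.mp
  simp [PySem.Str.toList_join, PySem.Chars.join_singleton]

-- the loop invariant: the settled prefix of A's list is B's groups, each joined with spaces
lemma mergeLoopA_eq (s : List String) : ∀ G : List (List String), (∀ g ∈ G, g ≠ []) →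
    mergeLoopA (G.map (PySem.Str.join " ") ++ s) (G.map (PySem.Str.join " ")).length
      = (s.foldl stepB G).map (PySem.Str.join " ") := by
  induction s with
  | nil =>
      intro G _
      rw [mergeLoopA]
      simp
  | cons x s' ih =>
      intro G hG
      rw [mergeLoopA]
      have hlt : (G.map (PySem.Str.join " ")).length
          < (G.map (PySem.Str.join " ") ++ x :: s').length := by simp
      rw [dif_pos hlt, getD_append_cons_length]
      by_cases hc : 0 < (G.map (PySem.Str.join " ")).length ∧ PySem.Str.len x < 10
      · rw [if_pos hc]
        rcases List.eq_nil_or_concat G with rfl | ⟨H, g, rfl⟩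
        · exact absurd hc.1 (by simp)
        · simp only [List.concat_eq_append] at hG hc ⊢
          have hgne : g ≠ [] := hG g (by simp)
          set q := H.map (PySem.Str.join " ") with hq
          set y := PySem.Str.join " " g with hy
          have hmap : (H ++ [g]).map (PySem.Str.join " ") = q ++ [y] := by simp [hq, hy]
          rw [hmap]
          have hassoc : (q ++ [y]) ++ x :: s' = q ++ y :: x :: s' := by simp
          have h1 : (q ++ [y]).length - 1 = q.length := by simp
          have h2 : ((q ++ [y]) ++ x :: s').getD ((q ++ [y]).length - 1) "" = y := by
            rw [h1, hassoc]; exact getD_append_cons_length q (x :: s') y ""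
          rw [h2]
          have h3 : ((q ++ [y]) ++ x :: s').set ((q ++ [y]).length - 1)
              (pvCat (pvCat y " ") x) = q ++ pvCat (pvCat y " ") x :: x :: s' := by
            rw [h1, hassoc]
            rw [List.set_append_right _ _ (le_refl q.length)]
            simp
          rw [h3]
          have h4 : (q ++ pvCat (pvCat y " ") x :: x :: s').eraseIdx (q ++ [y]).length
              = (q ++ [pvCat (pvCat y " ") x]) ++ s' := by
            have : (q ++ pvCat (pvCat y " ") x :: x :: s')
                = (q ++ [pvCat (pvCat y " ") x]) ++ x :: s' := by simp
            rw [this, show (q ++ [y]).length = (q ++ [pvCat (pvCat y " ") x]).length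
              from by simp]
            exact eraseIdx_append_cons_length _ _ _
          rw [h4]
          have hmap2 : (H ++ [g ++ [x]]).map (PySem.Str.join " ")
              = q ++ [pvCat (pvCat y " ") x] := by
            simp only [List.map_append, List.map_cons, List.map_nil, hq]
            rw [hy, join_concat g hgne x]
          have hlen2 : (q ++ [y]).length = ((H ++ [g ++ [x]]).map (PySem.Str.join " ")).length := by
            simp [hq]
          rw [hlen2, ← hmap2, ih (H ++ [g ++ [x]]) (by
            intro h hmem
            rcases List.mem_append.mp hmem with h1 | h1
            · exact hG h (by simp [h1])
            · simp only [List.mem_singleton] at h1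
              subst h1; simp)]
          rw [List.foldl_cons]
          congr 1
          rw [stepB, if_pos ⟨by simp, hc.2⟩, pyGetD_append_singleton_neg_one,
            pySetD_append_singleton_neg_one]
      · rw [if_neg hc]
        have hmap : G.map (PySem.Str.join " ") ++ x :: s'
            = ((G ++ [[x]]).map (PySem.Str.join " ")) ++ s' := by
          simp [join_singleton_str]
        have hlen : (G.map (PySem.Str.join " ")).length + 1
            = ((G ++ [[x]]).map (PySem.Str.join " ")).length := by simp
        rw [hmap, hlen, ih (G ++ [[x]]) (by
          intro h hmem
          rcases List.mem_append.mp hmem with h1 | h1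
          · exact hG h h1
          · simp only [List.mem_singleton] at h1; subst h1; simp)]
        rw [List.foldl_cons]
        congr 1
        rw [stepB, if_neg (by
          intro h
          exact hc ⟨by simpa using List.length_pos_iff.mpr h.1, h.2⟩)]

-- ===== VERDICT (by name: the statement is the Claim_ definition above) =====
theorem merge_short_elements_spec : Claim_equal_merge_short_elements := by
  intro lst _
  unfold Spec_merge_short_elements merge_short_elements merge_short_elements_alt
  have := mergeLoopA_eq lst [] (by simp)
  simpa using this
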